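-- pv_equiv track=rewrite | github.com/novigit/broCode | splice_region.py | splice_region
-- ===== SOURCE A (Python) =====
-- def splice_region(region, introns):
--     '''
--     Take a sequence string and a list of lists containing
--     intron borders and splice out the introns from the
--     sequence string
--     '''
--     # -1 from intron start (='exon' end)
--     # +1 from intron end   (='exon' start)
--     introns = [ [b[0]-1 , b[1]+1] for b in introns ]
--
--     # flatten list and convert to 0-indexing
--     f = [ x-1 for b in introns for x in b ]
--     # add start and end (0-indexed)
--     f.insert(0, 0)
--     f.append(len(region)-1)
--
--     # repack list
--     borders = [ [f[i],f[i+1]] for i in range(0, len(f), 2) ]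
--     # construct spliced region
--     spliced_region = ''
--     for b in borders:
--         spliced_region += region[ b[0]:b[1]+1 ]
--     return spliced_region
-- ===== SOURCE B (Python) =====
-- def splice_region(region, introns):
--     '''
--     Take a sequence string and a list of lists containing
--     intron borders and splice out the introns from the
--     sequence string
--     '''
--     parts = []
--     prev = 0
--     for b in introns:
--         parts.append(region[prev : b[0]-1])
--         prev = b[1]
--     parts.append(region[prev:])
--     return ''.join(parts)
-- ===== Notes on version B (the rewrite author's own statement) =====
-- stated objective: simpler
-- what changed: Replaced the map/flatten/insert/append/repack-into-pairs machinery by one pass over introns with a running cursor, slicing the kept exon directly between the previous intron end and the next intron start.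
import Mathlib
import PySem

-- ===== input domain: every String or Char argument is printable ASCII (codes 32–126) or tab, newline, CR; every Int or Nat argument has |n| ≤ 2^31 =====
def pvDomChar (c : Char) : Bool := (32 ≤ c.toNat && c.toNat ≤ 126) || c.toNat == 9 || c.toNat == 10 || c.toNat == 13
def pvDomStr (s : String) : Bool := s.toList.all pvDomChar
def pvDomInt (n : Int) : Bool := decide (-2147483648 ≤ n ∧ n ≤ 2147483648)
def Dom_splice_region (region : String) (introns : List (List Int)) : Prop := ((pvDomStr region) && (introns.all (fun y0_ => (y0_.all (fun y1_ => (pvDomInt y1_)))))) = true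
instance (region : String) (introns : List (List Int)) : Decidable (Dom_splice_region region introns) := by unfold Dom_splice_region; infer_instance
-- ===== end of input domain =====

-- B replaces A's map/flatten/insert/repack pipeline by one pass with a running cursor (return value only; neither mutates its arguments).

-- ===== PORT A =====
-- literal transliteration of A; strings are handled as their code-point lists and
-- repacked with String.ofList at the end; b[0]/b[1] are PySem.List.pyGetD (sublists
-- of length < 2, where Python raises IndexError, are excluded by Pre_ below).
def splice_region (region : String) (introns : List (List Int)) : String :=
  let cs := region.toList
  -- introns = [ [b[0]-1 , b[1]+1] for b in introns ]
  let introns1 := introns.map (fun b => [PySem.List.pyGetD b 0 0 - 1, PySem.List.pyGetD b 1 0 + 1])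
  -- f = [ x-1 for b in introns for x in b ]
  let f0 := introns1.flatMap (fun b => b.map (fun x => x - 1))
  -- f.insert(0, 0); f.append(len(region)-1)
  let f : List Int := (0 : Int) :: (f0 ++ [(cs.length : Int) - 1])
  -- borders = [ [f[i],f[i+1]] for i in range(0, len(f), 2) ]
  let borders := (PySem.List.pyRange 0 (f.length) 2).map
      (fun i => [PySem.List.pyGetD f i 0, PySem.List.pyGetD f (i + 1) 0])
  -- spliced_region accumulation: spliced_region += region[b[0]:b[1]+1]
  let spliced := borders.foldl
      (fun acc b => acc ++ PySem.List.slice cs (some (PySem.List.pyGetD b 0 0))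
                                              (some (PySem.List.pyGetD b 1 0 + 1))) []
  String.ofList spliced

-- ===== PORT B =====
-- literal transliteration of Source B: parts list + running cursor, joined at the end ('' .join = flatten).
def splice_region_alt (region : String) (introns : List (List Int)) : String :=
  let cs := region.toList
  let st := introns.foldl
      (fun (st : List (List Char) × Int) b =>
        (st.1 ++ [PySem.List.slice cs (some st.2) (some (PySem.List.pyGetD b 0 0 - 1))],
         PySem.List.pyGetD b 1 0))
      ([], 0)
  String.ofList (st.1 ++ [PySem.List.slice cs (some st.2) none]).flatten

-- ===== PRECONDITION & SPEC =====
-- Pre_ excludes exactly the inputs where Python A raises IndexError: an intron sublist with fewer than 2 elements.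
def Pre_splice_region (region : String) (introns : List (List Int)) : Prop :=
  ∀ b ∈ introns, 2 ≤ b.length
instance (region : String) (introns : List (List Int)) : Decidable (Pre_splice_region region introns) := by
  unfold Pre_splice_region; infer_instance
def pvWitness_splice_region : String × List (List Int) := ("ABCDEFGHIJ", [[3, 5], [8, 9]])
def Spec_splice_region (region : String) (introns : List (List Int)) (out : String) : Prop := out = splice_region_alt region introns
instance (region : String) (introns : List (List Int)) (out : String) : Decidable (Spec_splice_region region introns out) := by unfold Spec_splice_region; infer_instance

-- ===== CLAIM (what is proved, stated in full; the proofs are below) =====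
def Claim_equal_splice_region : Prop := ∀ (region : String) (introns : List (List Int)), Dom_splice_region region introns → Pre_splice_region region introns → Spec_splice_region region introns (splice_region region introns)

-- ===== LEMMAS AND PROOFS =====

-- pair-chunking of a list, as A's `borders` repacking produces it (proof-only helper)
def chunk2 : List Int → List (List Int)
  | [] => []
  | [a] => [[a, 0]]
  | a :: b :: r => [a, b] :: chunk2 r

theorem pyGetD_cons2 (a b : Int) (r : List Int) (k : Nat) (d : Int) :
    PySem.List.pyGetD (a :: b :: r) ((k : Int) + 2) d = PySem.List.pyGetD r (k : Int) d := by
  rw [show ((k : Int) + 2) = ((k + 2 : Nat) : Int) by push_cast; ring,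
    PySem.List.pyGetD_natCast, PySem.List.pyGetD_natCast]
  rfl

theorem range_chunk2 (f : List Int) :
    (List.range ((f.length + 1) / 2)).map
      (fun (k : Nat) => [PySem.List.pyGetD f (2 * (k : Int)) 0, PySem.List.pyGetD f (2 * (k : Int) + 1) 0])
      = chunk2 f := by
  induction f using chunk2.induct with
  | case1 => simp [chunk2]
  | case2 a =>
      norm_num [chunk2, PySem.List.pyGetD_ofNat']
  | case3 a b r ih =>
      rw [List.length_cons, List.length_cons,
        show (r.length + 1 + 1 + 1) / 2 = (r.length + 1) / 2 + 1 by omega,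
        List.range_succ_eq_map, List.map_cons, List.map_map]
      have hhead : [PySem.List.pyGetD (a :: b :: r) (2 * ((0 : Nat) : Int)) 0,
          PySem.List.pyGetD (a :: b :: r) (2 * ((0 : Nat) : Int) + 1) 0] = [a, b] := by
        norm_num [PySem.List.pyGetD_ofNat']
      rw [hhead, chunk2]
      congr 1
      rw [← ih]
      apply List.map_congr_left
      intro k _
      rw [Function.comp_apply,
        show (2 : Int) * ((Nat.succ k : Nat) : Int) = ((2 * k : Nat) : Int) + 2 by push_cast; ring,
        show ((2 * k : Nat) : Int) + 2 + 1 = ((2 * k + 1 : Nat) : Int) + 2 by push_cast; ring,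
        pyGetD_cons2, pyGetD_cons2,
        show ((2 * k : Nat) : Int) = 2 * (k : Int) by push_cast; ring,
        show ((2 * k + 1 : Nat) : Int) = 2 * (k : Int) + 1 by push_cast; ring]

theorem borders_eq_chunk2 (f : List Int) :
    (PySem.List.pyRange 0 (f.length) 2).map
      (fun i => [PySem.List.pyGetD f i 0, PySem.List.pyGetD f (i + 1) 0]) = chunk2 f := by
  rw [PySem.List.pyRange_of_pos 0 (f.length) (by norm_num), List.map_map]
  have hc : (if (0 : Int) < (f.length : Int) then (((f.length : Int) - 0 + 2 - 1) / 2).toNat else 0)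
      = (f.length + 1) / 2 := by
    rcases Nat.eq_zero_or_pos f.length with h | h
    · simp [h]
    · rw [if_pos (by exact_mod_cast h),
        show ((f.length : Int) - 0 + 2 - 1) = ((f.length + 1 : Nat) : Int) by push_cast; ring,
        show ((2 : Int)) = ((2 : Nat) : Int) from rfl, ← Int.natCast_div, Int.toNat_natCast]
  rw [hc, ← range_chunk2 f]
  apply List.map_congr_left
  intro k _
  simp only [Function.comp_apply, zero_add]

-- B's pieces, recursively (proof-only helper)
def piecesB (cs : List Char) : List (List Int) → Int → List (List Char)
  | [], _ => []
  | b :: t, prev =>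
      PySem.List.slice cs (some prev) (some (PySem.List.pyGetD b 0 0 - 1))
        :: piecesB cs t (PySem.List.pyGetD b 1 0)

def lastPrev : List (List Int) → Int → Int
  | [], prev => prev
  | b :: t, _ => lastPrev t (PySem.List.pyGetD b 1 0)

theorem foldB_eq (cs : List Char) (introns : List (List Int))
    (acc : List (List Char)) (prev : Int) :
    introns.foldl
      (fun (st : List (List Char) × Int) b =>
        (st.1 ++ [PySem.List.slice cs (some st.2) (some (PySem.List.pyGetD b 0 0 - 1))],
         PySem.List.pyGetD b 1 0)) (acc, prev)
    = (acc ++ piecesB cs introns prev, lastPrev introns prev) := by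
  induction introns generalizing acc prev with
  | nil => simp [piecesB, lastPrev]
  | cons b t ih => simp [piecesB, lastPrev, ih]

theorem slice_stop_len (cs : List Char) (a : Int) :
    PySem.List.slice cs (some a) (some (cs.length : Int)) = PySem.List.slice cs (some a) none := by
  simp [PySem.List.slice]

theorem pyGetD_pair0 (a b d : Int) : PySem.List.pyGetD [a, b] 0 d = a := rfl
theorem pyGetD_pair1 (a b d : Int) : PySem.List.pyGetD [a, b] 1 d = b := rfl

theorem chunk2_flat (cs : List Char) (introns : List (List Int)) (prev : Int) :
    (chunk2 (prev :: (introns.flatMap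
        (fun b => [PySem.List.pyGetD b 0 0 - 2, PySem.List.pyGetD b 1 0]) ++ [(cs.length : Int) - 1]))).flatMap
      (fun b => PySem.List.slice cs (some (PySem.List.pyGetD b 0 0)) (some (PySem.List.pyGetD b 1 0 + 1)))
    = (piecesB cs introns prev ++ [PySem.List.slice cs (some (lastPrev introns prev)) none]).flatten := by
  induction introns generalizing prev with
  | nil =>
      simp only [List.flatMap_nil, List.nil_append, chunk2, List.flatMap_cons, List.flatMap_nil,
        pyGetD_pair0, pyGetD_pair1, piecesB, lastPrev, List.flatten_cons, List.flatten_nil,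
        List.append_nil]
      rw [show (cs.length : Int) - 1 + 1 = (cs.length : Int) by ring]
      exact slice_stop_len cs prev
  | cons b t ih =>
      simp only [List.flatMap_cons, List.cons_append, chunk2, pyGetD_pair0, pyGetD_pair1,
        piecesB, lastPrev, List.flatten_cons, List.append_assoc]
      rw [show PySem.List.pyGetD b 0 0 - 2 + 1 = PySem.List.pyGetD b 0 0 - 1 by ring,
        List.nil_append, ih]

-- ===== VERDICT (by name: the statement is the Claim_ definition above) =====
theorem splice_region_spec : Claim_equal_splice_region := by
  intro region introns _ _
  unfold Spec_splice_region splice_region splice_region_alt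
  simp only [foldB_eq, borders_eq_chunk2, PySem.List.foldl_append_eq_flatMap, List.nil_append]
  rw [show (introns.map (fun b => [PySem.List.pyGetD b 0 0 - 1, PySem.List.pyGetD b 1 0 + 1])).flatMap
        (fun b => b.map (fun x => x - 1))
      = introns.flatMap (fun b => [PySem.List.pyGetD b 0 0 - 2, PySem.List.pyGetD b 1 0]) by
    simp only [List.flatMap_map]; congr 1; funext b; simp only [List.map_cons, List.map_nil]; ring_nf]
  rw [chunk2_flat]
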